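-- pv_equiv track=rewrite | github.com/SantiagoGuiral/ress | moves2PGN_parser.py | decode_stringhistory
-- ===== SOURCE A (Python) =====
-- def move(m):
-- 	"""Pasa cada movimiento de una ficha al formato PGN.
-- 	"""
-- 	M = ""  #Guarda la jugada en formato PGN
-- 	capture = 0
-- 	# Caracteriza el movimiento, sí se mueve una ficha o dos en el caso del movimiento Castle
-- 	if(m.lower() == "ooo" or m.lower() == "oo"):
-- 		M = '-'.join(m.upper()) #https://stackoverflow.com/a/3258612/8235105
-- 		return M
-- 	else:
-- 		# Organiza la jugada en formato PGN
-- 		if(m[0].lower() != "x"): # Jugadas cuando solo se movio una ficha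
-- 			past = m[0:2]
-- 			present = m[-2:len(m)]
-- 			piece = m[2:-2]
-- 		else:	# Jugadas cuando se presenta la captura de una ficha
-- 			past = m[1:3]
-- 			present = m[-2:len(m)]
-- 			piece = m[3:-2]
-- 			capture = 1
-- 		#rendering the move:
-- 		pt = piece[0] #piece type
-- 		if(pt.lower() == "p"):
-- 			M = f"{past[0]}x{present}" if(capture) else f"{present}"
-- 		else:
-- 			M = f"{pt.upper()}{past}x{present}" if(capture) else f"{pt.upper()}{past}{present}" #remove upper() if needed
-- 		return M
--
-- def decode_stringhistory(record):
-- 	""" Cambia el formato del historial de jugadas y lo pasa a PGN. para esto recibe una cadena de caracteres con los movimientos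
-- 	de las fichas y para cada una formatea la jugada de acuerdo al estandar PGN.
-- 	"""
-- 	record_listed = record.split(" - ") # Separa las jugadas
-- 	record_listed[-1] = record_listed[-1][:-1] # Elimina el espacio al inicio y final de la cadena de caracteres
-- 	if(record_listed[-1] == ""):
-- 		record_listed.pop()
-- 	record_ordered = "" # Cadena de caracteres que guarda las jugadas PGN
-- 	# Itera sobre cada jugada para pasarla a PGN
-- 	for i,m in enumerate(record_listed):
-- 		iteration = i//2+1
-- 		Blackstate = i%2
-- 		if(not Blackstate):
-- 			record_ordered += f"{iteration}. "
-- 		processed_move = move(m) # Organiza la jugada en formato PGN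
-- 		record_ordered += f"{processed_move} " # Agrega la jugada a la cadena de caracteres
-- 	return record_ordered
-- ===== SOURCE B (Python) =====
-- def move(m):
-- 	"""Pasa cada movimiento de una ficha al formato PGN (reestructurado)."""
-- 	lm = m.lower()
-- 	if lm in ("oo", "ooo"):
-- 		return "-".join(m.upper())
-- 	capture = lm.startswith("x")
-- 	if capture:
-- 		past, piece, present = m[1:3], m[3:-2], m[-2:]
-- 	else:
-- 		past, piece, present = m[0:2], m[2:-2], m[-2:]
-- 	pt = piece[0]
-- 	if pt.lower() == "p":
-- 		return past[0] + "x" + present if capture else present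
-- 	return pt.upper() + past + ("x" if capture else "") + present
--
-- def decode_stringhistory(record):
-- 	"""Mismo resultado que A: agrupa las jugadas por numero de movida (pares blanca/negra)."""
-- 	moves = record.split(" - ")
-- 	moves[-1] = moves[-1][:-1]
-- 	if moves[-1] == "":
-- 		moves.pop()
-- 	parts = []
-- 	number = 1
-- 	while moves:
-- 		pair, moves = moves[:2], moves[2:]
-- 		parts.append(f"{number}. " + " ".join(move(m) for m in pair) + " ")
-- 		number += 1
-- 	return "".join(parts)
-- ===== Notes on version B (the rewrite author's own statement) =====
-- stated objective: alternative
-- what changed: A walks plies one by one with enumerate and i%2 to decide when to emit a move number; B consumes the move list two plies (one full move) at a time, formatting each numbered pair into a parts list joined at the end, with move() restructured around a precomputed lowercase/startswith capture test and shared m[-2:] slice.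
import Mathlib
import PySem

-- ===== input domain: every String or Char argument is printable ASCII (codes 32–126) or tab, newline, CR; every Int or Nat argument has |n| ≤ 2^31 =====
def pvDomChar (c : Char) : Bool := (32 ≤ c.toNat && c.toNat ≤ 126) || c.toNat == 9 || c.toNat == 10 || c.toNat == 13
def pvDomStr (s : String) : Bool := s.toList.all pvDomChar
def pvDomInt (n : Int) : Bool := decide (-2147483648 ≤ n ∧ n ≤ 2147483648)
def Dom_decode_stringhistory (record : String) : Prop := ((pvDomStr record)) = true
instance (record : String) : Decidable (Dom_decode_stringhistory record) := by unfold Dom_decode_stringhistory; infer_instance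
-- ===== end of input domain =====

-- B regroups A's per-ply loop (enumerate + i%2) into a loop over full-move pairs; same return value.

-- ===== PORT A =====
-- move(m) as in the source: branch order and slice indices kept; the `none` match arms
-- are exactly the inputs where Python raises IndexError (excluded by Pre_ below).
def moveA (m : String) : String :=
  if PySem.Str.lower m == "ooo" || PySem.Str.lower m == "oo" then
    PySem.Str.join "-" ((PySem.Str.upper m).toList.map (fun c => String.ofList [c]))
  else
    match PySem.Str.pyGet? m 0 with
    | none => ""  -- Python: IndexError here (outside Pre_)
    | some c0 =>
      if !(PySem.Chars.lowerChar c0 == 'x') then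
        let past := PySem.Str.slice m (some 0) (some 2)
        let present := PySem.Str.slice m (some (-2)) (some (PySem.Str.len m : Int))
        let piece := PySem.Str.slice m (some 2) (some (-2))
        match PySem.Str.pyGet? piece 0 with
        | none => ""  -- Python: IndexError here (outside Pre_)
        | some pt =>
          if PySem.Chars.lowerChar pt == 'p' then
            present
          else
            String.ofList [PySem.Chars.upperChar pt] ++ past ++ present
      else
        let past := PySem.Str.slice m (some 1) (some 3)
        let present := PySem.Str.slice m (some (-2)) (some (PySem.Str.len m : Int))
        let piece := PySem.Str.slice m (some 3) (some (-2))
        match PySem.Str.pyGet? piece 0 with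
        | none => ""  -- Python: IndexError here (outside Pre_)
        | some pt =>
          if PySem.Chars.lowerChar pt == 'p' then
            match PySem.Str.pyGet? past 0 with
            | none => ""
            | some p0 => String.ofList [p0] ++ "x" ++ present
          else
            String.ofList [PySem.Chars.upperChar pt] ++ past ++ "x" ++ present

-- A's `for i, m in enumerate(record_listed)` loop, as recursion over (index, list, accumulator).
def loopA : Nat → List String → String → String
  | _, [], acc => acc
  | i, m :: rest, acc =>
      let acc1 := if i % 2 == 0 then acc ++ PySem.Int.toStr ((i / 2 + 1 : Nat) : Int) ++ ". " else acc
      loopA (i + 1) rest (acc1 ++ moveA m ++ " ")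

def decode_stringhistory (record : String) : String :=
  let L := (PySem.Str.split? record " - ").getD []   -- sep " - " ≠ "" : split? is never none
  let L2 := L.dropLast ++ [PySem.Str.slice (L.getLast?.getD "") none (some (-1))]
  let ms := if L2.getLast?.getD "" == "" then L2.dropLast else L2
  loopA 0 ms ""

-- ===== PORT B =====
-- B's move(m): lm precomputed, capture via startswith, shared `present = m[-2:]`, plain concatenation.
def moveB (m : String) : String :=
  let lm := PySem.Str.lower m
  if lm == "oo" || lm == "ooo" then
    PySem.Str.join "-" ((PySem.Str.upper m).toList.map (fun c => String.ofList [c]))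
  else
    let capture := PySem.Str.startswith lm "x"
    let past := if capture then PySem.Str.slice m (some 1) (some 3) else PySem.Str.slice m (some 0) (some 2)
    let piece := if capture then PySem.Str.slice m (some 3) (some (-2)) else PySem.Str.slice m (some 2) (some (-2))
    let present := PySem.Str.slice m (some (-2)) none
    match PySem.Str.pyGet? piece 0 with
    | none => ""  -- Python: IndexError here (outside Pre_)
    | some pt =>
      if PySem.Chars.lowerChar pt == 'p' then
        if capture then
          match PySem.Str.pyGet? past 0 with
          | none => ""
          | some p0 => String.ofList [p0] ++ "x" ++ present
        else present
      else
        String.ofList [PySem.Chars.upperChar pt] ++ past ++ (if capture then "x" else "") ++ present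

-- B's `while moves: pair, moves = moves[:2], moves[2:]` loop, building the parts list.
def pairsB : Nat → List String → List String
  | _, [] => []
  | n, [w] => [PySem.Int.toStr (n : Int) ++ ". " ++ PySem.Str.join " " [moveB w] ++ " "]
  | n, w :: b :: rest =>
      (PySem.Int.toStr (n : Int) ++ ". " ++ PySem.Str.join " " [moveB w, moveB b] ++ " ") :: pairsB (n + 1) rest

def decode_stringhistory_alt (record : String) : String :=
  let L := (PySem.Str.split? record " - ").getD []   -- sep " - " ≠ "" : split? is never none
  let L2 := L.dropLast ++ [PySem.Str.slice (L.getLast?.getD "") none (some (-1))]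
  let ms := if L2.getLast?.getD "" == "" then L2.dropLast else L2
  PySem.Str.join "" (pairsB 1 ms)

-- ===== PRECONDITION & SPEC =====
-- The trimmed move list both Pythons loop over (their shared split/chop/pop preprocessing).
def pvMoves (record : String) : List String :=
  let L := (PySem.Str.split? record " - ").getD []
  let L2 := L.dropLast ++ [PySem.Str.slice (L.getLast?.getD "") none (some (-1))]
  if L2.getLast?.getD "" == "" then L2.dropLast else L2

-- A move string Python's move() handles without raising: a castle word, or long enough
-- that the `piece` slice is nonempty (≥ 6 chars for a capture, ≥ 5 otherwise).
def pvMoveOk (m : String) : Bool :=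
  (PySem.Str.lower m == "ooo" || PySem.Str.lower m == "oo") ||
  (match m.toList with
   | [] => false
   | c :: _ =>
     if PySem.Chars.lowerChar c == 'x' then decide (6 ≤ m.toList.length)
     else decide (5 ≤ m.toList.length))

-- Pre_ holds exactly where A returns: on any other record, move() raises IndexError.
def Pre_decode_stringhistory (record : String) : Prop :=
  ∀ m ∈ pvMoves record, pvMoveOk m = true

instance (record : String) : Decidable (Pre_decode_stringhistory record) := by
  unfold Pre_decode_stringhistory; infer_instance

def pvWitness_decode_stringhistory : String := "a2Qb3 - xc7Rc5 - oo "

def Spec_decode_stringhistory (record : String) (out : String) : Prop := out = decode_stringhistory_alt record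
instance (record : String) (out : String) : Decidable (Spec_decode_stringhistory record out) := by unfold Spec_decode_stringhistory; infer_instance

-- ===== CLAIM (what is proved, stated in full; the proofs are below) =====
def Claim_equal_decode_stringhistory : Prop := ∀ (record : String), Dom_decode_stringhistory record → Pre_decode_stringhistory record → Spec_decode_stringhistory record (decode_stringhistory record)

-- ===== LEMMAS AND PROOFS =====

-- ''.join(x :: l) peels off its head.
theorem pv_join_empty_cons (x : String) (l : List String) :
    PySem.Str.join "" (x :: l) = x ++ PySem.Str.join "" l := by
  apply String.toList_inj.mp
  cases l with
  | nil => simp [PySem.Str.toList_join, PySem.Chars.join_singleton, PySem.Chars.join_nil]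
  | cons y t => simp [PySem.Str.toList_join, PySem.Chars.join_cons_cons]

-- m[-2:len(m)] (A) and m[-2:] (B) are the same slice.
theorem pv_present_eq (m : String) :
    PySem.Str.slice m (some (-2)) (some (PySem.Str.len m : Int)) = PySem.Str.slice m (some (-2)) none := by
  apply String.toList_inj.mp
  simp only [PySem.Str.toList_slice, PySem.Chars.slice_eq_listSlice, PySem.Str.len_eq]
  simp [PySem.List.slice, PySem.List.clampIdx]
  split_ifs <;> omega

-- The two move() versions agree on every move string Python handles.
theorem pv_move_eq (m : String) (h : pvMoveOk m = true) : moveA m = moveB m := by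
  by_cases hc : (PySem.Str.lower m == "ooo" || PySem.Str.lower m == "oo") = true
  · have hc' : (PySem.Str.lower m == "oo" || PySem.Str.lower m == "ooo") = true := by
      rw [Bool.or_comm] at hc; exact hc
    unfold moveA moveB
    rw [if_pos hc, if_pos hc']
  · have hc' : (PySem.Str.lower m == "oo" || PySem.Str.lower m == "ooo") = true → False := by
      rw [Bool.or_comm]; exact fun hh => hc hh
    obtain ⟨c, cs, hm⟩ : ∃ c cs, m.toList = c :: cs := by
      unfold pvMoveOk at h
      rw [Bool.or_eq_true] at h
      rcases h with h | h
      · exact absurd h hc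
      · cases hml : m.toList with
        | nil => rw [hml] at h; simp at h
        | cons c cs => exact ⟨c, cs, rfl⟩
    have hget : PySem.Str.pyGet? m 0 = some c := by simp [hm]
    have hcap : PySem.Str.startswith (PySem.Str.lower m) "x" = (PySem.Chars.lowerChar c == 'x') := by
      simp [PySem.Str.startswith, PySem.Chars.startswith, PySem.Str.toList_lower, PySem.Chars.lower,
            hm, List.isPrefixOf, eq_comm]
    unfold moveA moveB
    rw [if_neg hc, if_neg (by exact fun hh => hc' hh)]
    rw [hget, hcap, pv_present_eq]
    by_cases hx : (PySem.Chars.lowerChar c == 'x') = true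
    · simp only [hx, Bool.not_true, if_true, if_false, Bool.false_eq_true]
    · simp only [Bool.not_eq_true] at hx
      simp only [hx, Bool.not_false, if_true, if_false, Bool.false_eq_true]
      cases PySem.Str.pyGet? (PySem.Str.slice m (some 2) (some (-2))) 0 with
      | none => rfl
      | some pt =>
        by_cases hp : (PySem.Chars.lowerChar pt == 'p') = true
        · simp [hp]
        · simp only [Bool.not_eq_true] at hp
          simp [hp]

-- A's per-ply loop from an even index 2k equals B's pair loop from move number k+1.
theorem pv_loop_eq : ∀ (ms : List String), (∀ m ∈ ms, pvMoveOk m = true) →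
    ∀ (k : Nat) (acc : String), loopA (2 * k) ms acc = acc ++ PySem.Str.join "" (pairsB (k + 1) ms)
  | [], _, k, acc => by
      apply String.toList_inj.mp
      simp [loopA, pairsB, PySem.Str.toList_join, PySem.Chars.join_nil]
  | [w], h, k, acc => by
      have hw : moveA w = moveB w := pv_move_eq w (h w (by simp))
      have h0 : 2 * k % 2 = 0 := by omega
      have e : 2 * k / 2 + 1 = k + 1 := by omega
      simp only [loopA, pairsB, h0, e, beq_self_eq_true, if_true]
      rw [pv_join_empty_cons, hw]
      apply String.toList_inj.mp
      simp [PySem.Str.toList_join, PySem.Chars.join_singleton, PySem.Chars.join_nil]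
  | w :: b :: rest, h, k, acc => by
      have hw : moveA w = moveB w := pv_move_eq w (h w (by simp))
      have hb : moveA b = moveB b := pv_move_eq b (h b (by simp))
      have h0 : 2 * k % 2 = 0 := by omega
      have h1 : (2 * k + 1) % 2 = 1 := by omega
      have e : 2 * k / 2 + 1 = k + 1 := by omega
      have e2 : 2 * k + 1 + 1 = 2 * (k + 1) := by omega
      have ih := pv_loop_eq rest (fun m hm => h m (by simp [hm])) (k + 1)
      simp only [loopA, pairsB, h0, h1, e, e2, beq_self_eq_true, if_true, Nat.one_ne_zero,
        beq_iff_eq, if_false, ih]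
      rw [pv_join_empty_cons, hw, hb]
      apply String.toList_inj.mp
      simp [PySem.Str.toList_join, PySem.Chars.join_cons_cons, PySem.Chars.join_singleton]

-- ===== VERDICT (by name: the statement is the Claim_ definition above) =====
theorem decode_stringhistory_spec : Claim_equal_decode_stringhistory := by
  intro record _ hpre
  show decode_stringhistory record = decode_stringhistory_alt record
  have h : decode_stringhistory record = loopA 0 (pvMoves record) "" := rfl
  have h' : decode_stringhistory_alt record = PySem.Str.join "" (pairsB 1 (pvMoves record)) := rfl
  rw [h, h']
  have := pv_loop_eq (pvMoves record) hpre 0 ""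
  simpa using this
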